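-- pv_equiv track=rewrite | github.com/chaseminert/easymp3 | util.py | get_invalid_filename_chars
-- ===== SOURCE A (Python) =====
-- INVALID_CHAR_MAP = {
--     ":": "-",
--     "\\": "-",
--     "/": "-",
--     "*": " ",
--     "?": " ",
--     "\"": "'",
--     "<": " ",
--     ">": " ",
--     "|": " "
-- }
--
-- def get_invalid_filename_chars(name: str, string=True):
--     invalid_chars = set()
--     for char in name:
--         if char in INVALID_CHAR_MAP:
--             invalid_chars.add(char)
--
--     invalid_tuple = tuple(sorted(invalid_chars))
--     if string:
--         wrapped_tuple = (f"'{char}'" for char in invalid_tuple)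
--         return ", ".join(wrapped_tuple)
--     else:
--         return invalid_tuple
-- ===== SOURCE B (Python) =====
-- # Sorted keys of INVALID_CHAR_MAP, written out once as a literal.
-- SORTED_INVALID = '"*/:<>?\\|'
--
--
-- def get_invalid_filename_chars(name: str, string=True):
--     # Loop over the fixed 9-char table (already sorted) instead of over the
--     # input, and build the comma-joined string with an explicit accumulator.
--     present = [c for c in SORTED_INVALID if c in name]
--     if not string:
--         return tuple(present)
--     out = ""
--     for c in present:
--         out = out + (", " if out else "") + "'" + c + "'"
--     return out
-- ===== Notes on version B (the rewrite author's own statement) =====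
-- stated objective: simpler
-- what changed: B reverses the membership test (loops over the fixed 9-char sorted key table keeping those occurring in the input, so the set and the sort of input characters disappear) and builds the joined string with an explicit accumulator loop instead of wrapping-generator + str.join.
-- outside the precondition, e.g. on get_invalid_filename_chars('a:b', False): A returns (':',), B returns (':',)
import Mathlib
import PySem

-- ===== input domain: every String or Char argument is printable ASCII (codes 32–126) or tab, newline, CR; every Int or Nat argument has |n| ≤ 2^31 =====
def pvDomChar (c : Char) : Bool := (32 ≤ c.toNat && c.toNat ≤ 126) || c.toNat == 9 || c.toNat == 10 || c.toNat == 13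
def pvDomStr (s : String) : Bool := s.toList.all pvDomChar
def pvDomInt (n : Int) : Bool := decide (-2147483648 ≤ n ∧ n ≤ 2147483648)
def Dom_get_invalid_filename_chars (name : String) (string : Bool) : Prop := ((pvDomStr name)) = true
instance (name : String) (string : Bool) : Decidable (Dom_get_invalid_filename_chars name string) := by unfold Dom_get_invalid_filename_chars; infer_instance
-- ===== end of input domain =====

-- B loops over the fixed 9-char sorted key table instead of the input (no set, no sort)
-- and joins with an explicit accumulator loop (objective: simpler).
-- Equivalence is about the return value for string = true only (see Pre_ below).

-- ===== PORT A =====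
-- keys of INVALID_CHAR_MAP in insertion order (dict-key membership test)
def pvInvalidKeys : List Char := [':', '\\', '/', '*', '?', '"', '<', '>', '|']

def get_invalid_filename_chars (name : String) (string : Bool) : String :=
  let invalid_chars : PySem.Set Char :=
    name.toList.foldl (fun s c => if pvInvalidKeys.contains c then PySem.Set.add s c else s)
      PySem.Set.empty
  let invalid_tuple : List Char := PySem.List.sorted invalid_chars (fun c => c) false
  if string then
    String.mk (PySem.Chars.join [',', ' '] (invalid_tuple.map (fun c => ['\'', c, '\''])))
  else
    -- Python returns a TUPLE of chars here (not a str) — excluded by Pre_; rendered as its chars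
    String.mk invalid_tuple

-- ===== PORT B =====
-- B's module constant SORTED_INVALID, a literal
def pvSortedInvalid : List Char := ['"', '*', '/', ':', '<', '>', '?', '\\', '|']

-- out = out + (", " if out else "") + "'" + c + "'", over the present chars
def pvJoinLoop : List Char → List Char → List Char
  | [], out => out
  | c :: rest, out =>
      pvJoinLoop rest (out ++ (if out.isEmpty then [] else [',', ' ']) ++ ['\'', c, '\''])

def get_invalid_filename_chars_alt (name : String) (string : Bool) : String :=
  let present : List Char := pvSortedInvalid.filter (fun c => name.toList.contains c)
  if !string then
    -- Python returns tuple(present) here (not a str) — excluded by Pre_; rendered as its chars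
    String.mk present
  else
    String.mk (pvJoinLoop present [])

-- ===== PRECONDITION & SPEC =====
-- Pre_ excludes string = false ONLY because there the Python function returns a TUPLE of
-- characters, which is not a value of the declared str/String return type and so cannot be
-- covered by these String-typed ports; B computes the identical tuple there (see cites) —
-- the exclusion is a typing limitation of the formalisation, not a behavioural difference.
def Pre_get_invalid_filename_chars (name : String) (string : Bool) : Prop := string = true
instance (name : String) (string : Bool) : Decidable (Pre_get_invalid_filename_chars name string) := by
  unfold Pre_get_invalid_filename_chars; infer_instance

def pvWitness_get_invalid_filename_chars : String × Bool := ("a:b?", true)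

def Spec_get_invalid_filename_chars (name : String) (string : Bool) (out : String) : Prop :=
  out = get_invalid_filename_chars_alt name string
instance (name : String) (string : Bool) (out : String) : Decidable (Spec_get_invalid_filename_chars name string out) := by
  unfold Spec_get_invalid_filename_chars; infer_instance

-- ===== CLAIM (what is proved, stated in full; the proofs are below) =====
def Claim_equal_get_invalid_filename_chars : Prop := ∀ (name : String) (string : Bool), Dom_get_invalid_filename_chars name string → Pre_get_invalid_filename_chars name string → Spec_get_invalid_filename_chars name string (get_invalid_filename_chars name string)

-- ===== LEMMAS AND PROOFS =====

-- A's "sorted set of input chars that are keys" is B's "sorted key table filtered by the input".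
lemma pv_lists_eq (name : String) :
    PySem.List.sorted
      (name.toList.foldl
        (fun s c => if pvInvalidKeys.contains c then PySem.Set.add s c else s) PySem.Set.empty)
      (fun c => c) false
    = pvSortedInvalid.filter (fun c => name.toList.contains c) := by
  have hset :
      name.toList.foldl
        (fun s c => if pvInvalidKeys.contains c then PySem.Set.add s c else s) PySem.Set.empty
      = PySem.Set.ofList (name.toList.filter (fun c => pvInvalidKeys.contains c)) := by
    rw [PySem.List.foldl_if_eq_foldl_filter, PySem.Set.ofList_eq_foldl]
    rfl
  rw [hset]
  apply PySem.List.sorted_eq_of_perm_of_pairwise_lt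
  · have h₁ : (pvSortedInvalid.filter (fun c => name.toList.contains c)).Nodup :=
      List.Nodup.filter _ (by decide)
    have h₂ : (PySem.Set.ofList
        (name.toList.filter (fun c => pvInvalidKeys.contains c))).Nodup :=
      PySem.Set.nodup_ofList _
    rw [List.perm_ext_iff_of_nodup h₁ h₂]
    intro x
    simp only [List.mem_filter, PySem.Set.mem_ofList,
      List.contains_iff_mem]
    constructor
    · rintro ⟨hk, hn⟩
      exact ⟨hn, by revert hk; simp [pvSortedInvalid, pvInvalidKeys]; tauto⟩
    · rintro ⟨hn, hk⟩
      exact ⟨by revert hk; simp [pvSortedInvalid, pvInvalidKeys]; tauto, hn⟩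
  · exact List.Pairwise.filter _ (by decide)

-- the accumulator loop with a non-empty accumulator appends ", 'c'" per char
lemma pvJoinLoop_acc (xs : List Char) (acc : List Char) (h : acc ≠ []) :
    pvJoinLoop xs acc = acc ++ xs.flatMap (fun c => [',', ' ', '\'', c, '\'']) := by
  induction xs generalizing acc with
  | nil => simp [pvJoinLoop]
  | cons c rest ih =>
      have hne : acc.isEmpty = false := by simpa [List.isEmpty_iff] using h
      rw [pvJoinLoop, hne]
      simp only [Bool.false_eq_true, if_false]
      rw [ih _ (by simp)]
      simp

-- B's accumulator loop equals A's ", ".join of the wrapped chars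
lemma pvJoinLoop_eq_join (xs : List Char) :
    pvJoinLoop xs [] = PySem.Chars.join [',', ' '] (xs.map (fun c => ['\'', c, '\''])) := by
  cases xs with
  | nil => simp [pvJoinLoop, PySem.Chars.join_nil]
  | cons c rest =>
      rw [pvJoinLoop]
      simp only [List.isEmpty_nil, if_true, List.nil_append]
      rw [pvJoinLoop_acc _ _ (by simp)]
      induction rest generalizing c with
      | nil => simp [PySem.Chars.join_singleton]
      | cons d rest ih =>
          have h := ih d
          rw [List.map_cons, List.map_cons, PySem.Chars.join_cons_cons]
          simp only [List.map_cons] at h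
          rw [← h]
          simp

-- ===== VERDICT (by name: the statement is the Claim_ definition above) =====
theorem get_invalid_filename_chars_spec : Claim_equal_get_invalid_filename_chars := by
  intro name string _ hpre
  unfold Spec_get_invalid_filename_chars
  unfold get_invalid_filename_chars get_invalid_filename_chars_alt
  rw [hpre]
  simp only [Bool.not_true, Bool.false_eq_true, if_false, if_true]
  rw [pv_lists_eq, pvJoinLoop_eq_join]
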